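-- pv_equiv track=rewrite | github.com/ElliottP-13/ComputationalBiology | HW4/Center_Star.py | compute_indx
-- ===== SOURCE A (Python) =====
-- def compute_indx(Sc,s2):
--     indx = []
--     for i in range(len(s2)):
--         if i >= len(Sc) or (s2[i] == '_' and Sc[i] != '_'):
--             indx.append(i)
--             Sc = Sc[:i] + '_' + Sc[i:]
--     indx += [len(Sc) + i for i in range(len(s2) - len(Sc))]
--     return indx
-- ===== SOURCE B (Python) =====
-- def compute_indx(Sc, s2):
--     # No string is ever rebuilt: j walks the ORIGINAL Sc; a gap is inserted (index recorded)
--     # exactly when Sc is exhausted or s2 has '_' where the original Sc does not.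
--     indx = []
--     j = 0
--     n = len(Sc)
--     for i, c in enumerate(s2):
--         if j >= n or (c == '_' and Sc[j] != '_'):
--             indx.append(i)
--         else:
--             j += 1
--     return indx
-- ===== Notes on version B (the rewrite author's own statement) =====
-- stated objective: alternative
-- what changed: B replaces A's repeated string re-slicing (rebuilding Sc at every gap insertion) with a single pass keeping a pointer j into the original, unmodified Sc; A's trailing comprehension is provably always empty and is dropped.
import Mathlib
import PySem

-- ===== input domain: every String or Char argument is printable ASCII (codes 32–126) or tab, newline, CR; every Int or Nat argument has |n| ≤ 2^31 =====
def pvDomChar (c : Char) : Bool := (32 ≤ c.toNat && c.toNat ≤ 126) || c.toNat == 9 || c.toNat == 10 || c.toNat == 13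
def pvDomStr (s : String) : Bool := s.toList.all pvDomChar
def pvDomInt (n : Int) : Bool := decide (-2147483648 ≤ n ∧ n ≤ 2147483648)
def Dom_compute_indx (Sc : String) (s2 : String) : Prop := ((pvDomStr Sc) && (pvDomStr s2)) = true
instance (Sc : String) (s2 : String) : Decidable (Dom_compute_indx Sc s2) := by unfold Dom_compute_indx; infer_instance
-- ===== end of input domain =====

-- B replaces A's repeated string re-slicing with a single pass over s2 keeping a pointer
-- into the original, unmodified Sc; return values proved equal on all inputs (A is total).

-- ===== PORT A =====
-- A's loop: state is the current (growing) Sc and the list of indices produced so far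
-- (produced in order, so built front-to-back here); returns (indices, final Sc).
-- Sc[:i] + '_' + Sc[i:] is take/drop (i is a nonnegative in-loop index, where Python's
-- slices agree with take/drop); Sc[i] is List.getD, evaluated only when i < length.
def computeIndxAGo (cur : List Char) (rest : List Char) (i : Nat) : List Int × List Char :=
  match rest with
  | [] => ([], cur)
  | c :: rest =>
    if i ≥ cur.length ∨ (c = '_' ∧ cur.getD i ' ' ≠ '_') then
      let res := computeIndxAGo (cur.take i ++ '_' :: cur.drop i) rest (i + 1)
      ((i : Int) :: res.1, res.2)
    else
      computeIndxAGo cur rest (i + 1)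

def compute_indx (Sc : String) (s2 : String) : List Int :=
  -- indx += [len(Sc) + i for i in range(len(s2) - len(Sc))]  (with the final Sc)
  (computeIndxAGo Sc.toList s2.toList 0).1 ++
    (PySem.List.pyRange 0 ((s2.toList.length : Int) -
        ((computeIndxAGo Sc.toList s2.toList 0).2.length : Int)) 1).map
      (fun k => ((computeIndxAGo Sc.toList s2.toList 0).2.length : Int) + k)

-- ===== PORT B =====
-- B's single pass: j is a pointer into the ORIGINAL Sc, i the index into s2.
def computeIndxBGo (Sc : List Char) (j : Nat) (i : Nat) : List Char → List Int
  | [] => []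
  | c :: rest =>
    if j ≥ Sc.length ∨ (c = '_' ∧ Sc.getD j ' ' ≠ '_') then
      (i : Int) :: computeIndxBGo Sc j (i + 1) rest
    else
      computeIndxBGo Sc (j + 1) (i + 1) rest

def compute_indx_alt (Sc : String) (s2 : String) : List Int :=
  computeIndxBGo Sc.toList 0 0 s2.toList

-- ===== PRECONDITION & SPEC =====
def Spec_compute_indx (Sc : String) (s2 : String) (out : List Int) : Prop := out = compute_indx_alt Sc s2
instance (Sc : String) (s2 : String) (out : List Int) : Decidable (Spec_compute_indx Sc s2 out) := by unfold Spec_compute_indx; infer_instance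

-- ===== CLAIM (what is proved, stated in full; the proofs are below) =====
def Claim_equal_compute_indx : Prop := ∀ (Sc : String) (s2 : String), Dom_compute_indx Sc s2 → Spec_compute_indx Sc s2 (compute_indx Sc s2)

-- ===== LEMMAS AND PROOFS =====

-- Loop invariant: the current Sc of A's loop has length i + (n - j) and agrees with the
-- original Sc from position i / j on; then A's loop produces B's indices and a final Sc
-- at least as long as i + |rest| (hence A's trailing comprehension is empty).
theorem computeIndx_key (rest : List Char) :
    ∀ (cur orig : List Char) (i j : Nat),
      j ≤ orig.length →
      cur.length = i + (orig.length - j) →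
      cur.drop i = orig.drop j →
      (computeIndxAGo cur rest i).1 = computeIndxBGo orig j i rest ∧
        i + rest.length ≤ (computeIndxAGo cur rest i).2.length := by
  induction rest with
  | nil =>
    intro cur orig i j hj hlen hdrop
    simp [computeIndxAGo, computeIndxBGo, hlen]
  | cons c rest ih =>
    intro cur orig i j hj hlen hdrop
    have hi : i ≤ cur.length := by omega
    have hhead : cur.getD i ' ' = orig.getD j ' ' := by
      have h1 : cur[i]? = orig[j]? := by
        have := congrArg (fun l => l[0]?) hdrop
        simpa [List.getElem?_drop] using this
      simp [List.getD_eq_getElem?_getD, h1]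
    have hcond : (i ≥ cur.length ∨ (c = '_' ∧ cur.getD i ' ' ≠ '_')) ↔
        (j ≥ orig.length ∨ (c = '_' ∧ orig.getD j ' ' ≠ '_')) := by
      rw [hhead]
      constructor <;> rintro (h | h) <;> [skip; exact Or.inr h; skip; exact Or.inr h] <;> exact Or.inl (by omega)
    by_cases h : j ≥ orig.length ∨ (c = '_' ∧ orig.getD j ' ' ≠ '_')
    · -- insertion branch on both sides
      have hA : (i ≥ cur.length ∨ (c = '_' ∧ cur.getD i ' ' ≠ '_')) := hcond.mpr h
      rw [computeIndxAGo, computeIndxBGo, if_pos hA, if_pos h]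
      have htake : (cur.take i).length = i := by simp [hi]
      have hlen' : (cur.take i ++ '_' :: cur.drop i).length = (i + 1) + (orig.length - j) := by
        simp; omega
      have hdrop' : (cur.take i ++ '_' :: cur.drop i).drop (i + 1) = orig.drop j := by
        have e0 : (cur.take i ++ '_' :: cur.drop i).drop (i + 1)
            = ('_' :: cur.drop i).drop 1 := by
          rw [List.drop_append]
          have e1 : (cur.take i).drop (i + 1) = [] := List.drop_eq_nil_of_le (by omega)
          rw [e1]
          simp [htake]
        rw [e0]; simpa using hdrop
      obtain ⟨h1, h2⟩ := ih _ orig (i + 1) j hj hlen' hdrop'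
      refine ⟨by simp [h1], by simp only [List.length_cons]; omega⟩
    · -- no insertion: advance j
      have hA : ¬ (i ≥ cur.length ∨ (c = '_' ∧ cur.getD i ' ' ≠ '_')) := fun hh => h (hcond.mp hh)
      rw [computeIndxAGo, computeIndxBGo, if_neg hA, if_neg h]
      have hjlt : j < orig.length := by
        by_contra hc; exact h (Or.inl (by omega))
      have hlen' : cur.length = (i + 1) + (orig.length - (j + 1)) := by omega
      have hdrop' : cur.drop (i + 1) = orig.drop (j + 1) := by
        have := congrArg (List.drop 1) hdrop
        simpa [List.drop_drop, Nat.add_comm] using this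
      obtain ⟨h1, h2⟩ := ih cur orig (i + 1) (j + 1) (by omega) hlen' hdrop'
      exact ⟨h1, by simp only [List.length_cons]; omega⟩

-- ===== VERDICT (by name: the statement is the Claim_ definition above) =====
theorem compute_indx_spec : Claim_equal_compute_indx := by
  intro Sc s2 _
  unfold Spec_compute_indx compute_indx compute_indx_alt
  obtain ⟨h1, h2⟩ := computeIndx_key s2.toList Sc.toList Sc.toList 0 0 (Nat.zero_le _)
    (by omega) rfl
  rw [PySem.List.pyRange_one_eq_nil (by omega)]
  simp [h1]
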